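-- pv_equiv track=rewrite | github.com/DIG-Network/proof_research | sub-problems/anonymous-quorum-binding/experiments/natural-primitives-failures/script.py | simulate_aggregate_key_ambiguity
-- ===== SOURCE A (Python) =====
-- def majority_threshold(n: int) -> int:
--     return n // 2 + 1
--
-- def simulate_aggregate_key_ambiguity(prime: int, generator: int) -> bool:
--     """
--     In Z_p*, let pk_i = g^{sk_i}. Aggregate PK_S = prod pk_i = g^{sum sk_i}.
--     Different subsets S, S' with same linear combination sum give same aggregate key
--     (trivial collision in exponents). Here we show two *different* subsets can yield
--     *different* aggregates — verifier must know which aggregate to pair against.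
--     """
--     def mod_pow(a: int, e: int, p: int) -> int:
--         return pow(a % p, e, p)
--
--     g = generator % prime
--     # Small toy keys
--     sk = [2, 3, 5, 7, 11, 13]
--     pk = [mod_pow(g, s, prime) for s in sk]
--     n = len(pk)
--
--     def agg(indices: list[int]) -> int:
--         r = 1
--         for i in indices:
--             r = (r * pk[i]) % prime
--         return r
--
--     # Two different majority subsets (n=6, t=4)
--     S1 = [0, 1, 2, 3]
--     S2 = [2, 3, 4, 5]
--     a1, a2 = agg(S1), agg(S2)
--     # They should differ in generic choice (not guaranteed for all primes — check)
--     distinct = a1 != a2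
--     # Verifier with only a commitment to {pk_i} and a claimed sig tied to ONE aggregate
--     # cannot deduce aggregate without knowing S or full linear comb info.
--     return distinct and n == 6 and majority_threshold(n) == 4
-- ===== SOURCE B (Python) =====
-- def majority_threshold(n: int) -> int:
--     return n // 2 + 1
--
-- def simulate_aggregate_key_ambiguity(prime: int, generator: int) -> bool:
--     # Aggregate of a subset is g^{sum of its sk}: one modular power per subset,
--     # no pk list and no per-index multiply loop.
--     a1 = pow(generator, 2 + 3 + 5 + 7, prime)       # S1 = sk[0..3]
--     a2 = pow(generator, 5 + 7 + 11 + 13, prime)     # S2 = sk[2..5]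
--     return a1 != a2 and majority_threshold(6) == 4
-- ===== Notes on version B (the rewrite author's own statement) =====
-- stated objective: simpler
-- what changed: Drops the pk list and the per-index multiply-and-reduce loop: each subset's aggregate is computed as a single modular power of the generator with the summed secret-key exponents (prod g^{sk_i} = g^{sum sk_i} mod p).
import Mathlib
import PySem

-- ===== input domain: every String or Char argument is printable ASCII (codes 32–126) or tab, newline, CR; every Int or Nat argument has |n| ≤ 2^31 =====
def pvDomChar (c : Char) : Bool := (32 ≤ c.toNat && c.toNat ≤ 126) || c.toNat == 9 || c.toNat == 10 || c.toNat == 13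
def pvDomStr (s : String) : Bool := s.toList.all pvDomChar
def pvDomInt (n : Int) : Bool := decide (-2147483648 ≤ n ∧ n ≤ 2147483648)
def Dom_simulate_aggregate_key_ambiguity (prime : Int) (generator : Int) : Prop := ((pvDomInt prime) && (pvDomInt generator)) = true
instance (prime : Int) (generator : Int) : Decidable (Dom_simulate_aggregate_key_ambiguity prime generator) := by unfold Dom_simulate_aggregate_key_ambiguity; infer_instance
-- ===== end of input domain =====

-- B replaces A's pk list and per-index multiply loop by one modular power per subset
-- (prod g^{sk_i} mod p = g^{sum sk_i} mod p); objective: simpler.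


-- ===== PORT A =====
def majority_threshold (n : Int) : Int := PySem.Int.floordiv n 2 + 1

-- inner helper mod_pow(a, e, p) = pow(a % p, e, p)
def pvModPow (a : Int) (e : Nat) (p : Int) : Int := PySem.Int.powMod (PySem.Int.mod a p) e p

def simulate_aggregate_key_ambiguity (prime : Int) (generator : Int) : Bool :=
  let g := PySem.Int.mod generator prime
  let sk : List Nat := [2, 3, 5, 7, 11, 13]
  let pk : List Int := sk.map (fun s => pvModPow g s prime)
  let n : Int := pk.length
  -- agg: r = 1; for i in indices: r = (r * pk[i]) % prime  (the literal indices are always in range)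
  let agg : List Int → Int := fun indices =>
    indices.foldl (fun r i => PySem.Int.mod (r * PySem.List.pyGetD pk i 0) prime) 1
  let a1 := agg [0, 1, 2, 3]
  let a2 := agg [2, 3, 4, 5]
  let distinct := a1 != a2
  distinct && (n == 6) && (majority_threshold n == 4)

-- ===== PORT B =====
def simulate_aggregate_key_ambiguity_alt (prime : Int) (generator : Int) : Bool :=
  let a1 := PySem.Int.powMod generator (2 + 3 + 5 + 7) prime
  let a2 := PySem.Int.powMod generator (5 + 7 + 11 + 13) prime
  (a1 != a2) && (majority_threshold 6 == 4)

-- ===== PRECONDITION & SPEC =====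
-- Pre_ excludes only prime = 0, where Python A raises ZeroDivisionError at `generator % prime`.
def Pre_simulate_aggregate_key_ambiguity (prime : Int) (generator : Int) : Prop := prime ≠ 0
instance (prime : Int) (generator : Int) : Decidable (Pre_simulate_aggregate_key_ambiguity prime generator) := by unfold Pre_simulate_aggregate_key_ambiguity; infer_instance
def pvWitness_simulate_aggregate_key_ambiguity : Int × Int := (7, 3)

def Spec_simulate_aggregate_key_ambiguity (prime : Int) (generator : Int) (out : Bool) : Prop := out = simulate_aggregate_key_ambiguity_alt prime generator
instance (prime : Int) (generator : Int) (out : Bool) : Decidable (Spec_simulate_aggregate_key_ambiguity prime generator out) := by unfold Spec_simulate_aggregate_key_ambiguity; infer_instance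

-- ===== CLAIM (what is proved, stated in full; the proofs are below) =====
def Claim_equal_simulate_aggregate_key_ambiguity : Prop := ∀ (prime : Int) (generator : Int), Dom_simulate_aggregate_key_ambiguity prime generator → Pre_simulate_aggregate_key_ambiguity prime generator → Spec_simulate_aggregate_key_ambiguity prime generator (simulate_aggregate_key_ambiguity prime generator)

-- ===== LEMMAS AND PROOFS =====

-- Int.fmod is Python's %, so a.fmod b is congruent to a modulo b.
theorem pvFmod_modeq (a b : Int) : a.fmod b ≡ a [ZMOD b] := by
  show a.fmod b % b = a % b
  rw [Int.fmod_eq_emod]; split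
  · simp
  · rw [Int.add_emod_right]; exact Int.emod_emod_of_dvd a dvd_rfl

-- Python's % only depends on the residue class of its left argument.
theorem pvFmod_congr {a a' b : Int} (h : a ≡ a' [ZMOD b]) : a.fmod b = a'.fmod b := by
  have he : a % b = a' % b := h
  have hd : (b ∣ a) ↔ (b ∣ a') := by
    rw [Int.dvd_iff_emod_eq_zero, Int.dvd_iff_emod_eq_zero, he]
  simp [Int.fmod_eq_emod, he, hd]

-- A's four-step multiply-and-reduce chain over pk equals one modular power of the exponent sum.
theorem pvChain4 (p gen : Int) (e1 e2 e3 e4 : Nat) :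
    Int.fmod (Int.fmod (Int.fmod (Int.fmod (pvModPow (Int.fmod gen p) e1 p) p * pvModPow (Int.fmod gen p) e2 p) p * pvModPow (Int.fmod gen p) e3 p) p * pvModPow (Int.fmod gen p) e4 p) p
    = PySem.Int.powMod gen (e1 + e2 + e3 + e4) p := by
  have hg : Int.fmod (Int.fmod gen p) p ≡ gen [ZMOD p] :=
    (pvFmod_modeq _ _).trans (pvFmod_modeq _ _)
  have hpk : ∀ k : Nat, pvModPow (Int.fmod gen p) k p ≡ gen ^ k [ZMOD p] := fun k =>
    (pvFmod_modeq _ _).trans (hg.pow k)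
  have c2 : Int.fmod (pvModPow (Int.fmod gen p) e1 p) p * pvModPow (Int.fmod gen p) e2 p ≡ gen ^ (e1 + e2) [ZMOD p] := by
    have h := ((pvFmod_modeq _ p).trans (hpk e1)).mul (hpk e2)
    calc _ ≡ gen ^ e1 * gen ^ e2 [ZMOD p] := h
      _ = gen ^ (e1 + e2) := (pow_add gen e1 e2).symm
  have c3 : Int.fmod (Int.fmod (pvModPow (Int.fmod gen p) e1 p) p * pvModPow (Int.fmod gen p) e2 p) p * pvModPow (Int.fmod gen p) e3 p ≡ gen ^ (e1 + e2 + e3) [ZMOD p] := by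
    have h := ((pvFmod_modeq _ p).trans c2).mul (hpk e3)
    calc _ ≡ gen ^ (e1 + e2) * gen ^ e3 [ZMOD p] := h
      _ = gen ^ (e1 + e2 + e3) := (pow_add gen (e1 + e2) e3).symm
  have c4 : Int.fmod (Int.fmod (Int.fmod (pvModPow (Int.fmod gen p) e1 p) p * pvModPow (Int.fmod gen p) e2 p) p * pvModPow (Int.fmod gen p) e3 p) p * pvModPow (Int.fmod gen p) e4 p ≡ gen ^ (e1 + e2 + e3 + e4) [ZMOD p] := by
    have h := ((pvFmod_modeq _ p).trans c3).mul (hpk e4)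
    calc _ ≡ gen ^ (e1 + e2 + e3) * gen ^ e4 [ZMOD p] := h
      _ = gen ^ (e1 + e2 + e3 + e4) := (pow_add gen (e1 + e2 + e3) e4).symm
  show _ = Int.fmod (gen ^ (e1 + e2 + e3 + e4)) p
  exact pvFmod_congr c4

-- ===== VERDICT (by name: the statement is the Claim_ definition above) =====
theorem simulate_aggregate_key_ambiguity_spec : Claim_equal_simulate_aggregate_key_ambiguity := by
  intro prime generator _ _
  show simulate_aggregate_key_ambiguity prime generator = simulate_aggregate_key_ambiguity_alt prime generator
  simp only [simulate_aggregate_key_ambiguity, simulate_aggregate_key_ambiguity_alt,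
    List.foldl, List.map, List.length, PySem.Int.mod]
  norm_num [PySem.List.pyGetD_ofNat']
  rw [pvChain4 prime generator 2 3 5 7, pvChain4 prime generator 5 7 11 13]
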